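-- pv_equiv track=rewrite | github.com/Reddysekhar8333/dsa-problems | searching/floor_of_target_num_BS.py | floor_of_target
-- ===== SOURCE A (Python) =====
-- def floor_of_target(arr, target):
--     "find_greatest_element_less_than_or_equal_to_target"
--     left, right = 0, len(arr) - 1
--     result = -1  # Default value if no valid element is found
--
--     while left <= right:
--         mid = left + (right -left) // 2  # Avoids overflow
--         if arr[mid] <= target:
--             result = arr[mid]  # Update result
--             left = mid + 1    # Search in the right half for a larger valid element
--         else:
--             right = mid - 1   # Search in the left half
--
--     return result
-- ===== SOURCE B (Python) =====
-- def floor_of_target(arr, target):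
--     "find_greatest_element_less_than_or_equal_to_target"
--     def go(size, lo, best):
--         # half-open window [lo, lo+size); probes the same midpoints as the
--         # classic (left, right) formulation: mid = lo + (size-1)//2
--         if size == 0:
--             return best
--         k = (size - 1) // 2
--         v = arr[lo + k]
--         if v <= target:
--             return go(size - k - 1, lo + k + 1, v)
--         return go(k, lo, best)
--     return go(len(arr), 0, -1)
-- ===== Notes on version B (the rewrite author's own statement) =====
-- stated objective: alternative
-- what changed: The iterative while-loop over signed (left, right) bounds with a mutable best-so-far is replaced by a recursive helper over an offset-and-size window of natural numbers (size = 0 is the base case, k = (size-1)//2 the probe offset), threading the best value as an argument.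
import Mathlib
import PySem

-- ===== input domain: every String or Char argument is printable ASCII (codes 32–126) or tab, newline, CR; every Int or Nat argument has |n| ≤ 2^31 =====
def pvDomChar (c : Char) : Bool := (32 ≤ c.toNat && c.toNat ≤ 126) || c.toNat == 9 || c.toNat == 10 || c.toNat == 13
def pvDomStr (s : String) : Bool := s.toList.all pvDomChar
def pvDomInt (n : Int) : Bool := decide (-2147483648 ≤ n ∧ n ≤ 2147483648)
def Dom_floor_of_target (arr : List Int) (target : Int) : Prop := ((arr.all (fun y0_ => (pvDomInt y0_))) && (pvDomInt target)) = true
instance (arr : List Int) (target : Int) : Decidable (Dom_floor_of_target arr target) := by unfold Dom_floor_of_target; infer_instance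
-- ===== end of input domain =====

-- B replaces A's while-loop over signed (left, right) bounds and a mutable best-so-far by a
-- recursive helper over an offset-and-size window of natural numbers, same probe order.

-- ===== PORT A =====
-- A's while-loop over state (left, right, result); fuel = interval size only makes the
-- loop total (it never runs out when fuel ≥ right+1-left, as at the top-level call).
-- arr[mid]: when called with 0 ≤ left and right ≤ len-1 the index is always in range,
-- so Python never raises; `.getD 0` is unreachable on those calls.
def floorLoopA (arr : List Int) (target : Int) : Nat → Int → Int → Int → Int
  | 0, _, _, result => result
  | fuel + 1, left, right, result =>
    if left ≤ right then
      let mid := left + PySem.Int.floordiv (right - left) 2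
      let v := (PySem.List.pyGet? arr mid).getD 0
      if v ≤ target then
        floorLoopA arr target fuel (mid + 1) right v
      else
        floorLoopA arr target fuel left (mid - 1) result
    else result

def floor_of_target (arr : List Int) (target : Int) : Int :=
  floorLoopA arr target arr.length 0 ((arr.length : Int) - 1) (-1)

-- ===== PORT B =====
-- B's recursive helper over a half-open window [lo, lo+size); recursion on the Nat size.
def goAlt (arr : List Int) (target : Int) : Nat → Nat → Int → Int
  | 0, _, best => best
  | size + 1, lo, best =>
    let k := size / 2       -- (size+1-1)//2 in Python
    let v := arr.getD (lo + k) 0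
    if v ≤ target then goAlt arr target (size - k) (lo + k + 1) v
    else goAlt arr target k lo best
termination_by size => size
decreasing_by all_goals omega

def floor_of_target_alt (arr : List Int) (target : Int) : Int :=
  goAlt arr target arr.length 0 (-1)

-- ===== PRECONDITION & SPEC =====
def Spec_floor_of_target (arr : List Int) (target : Int) (out : Int) : Prop := out = floor_of_target_alt arr target
instance (arr : List Int) (target : Int) (out : Int) : Decidable (Spec_floor_of_target arr target out) := by unfold Spec_floor_of_target; infer_instance

-- ===== CLAIM =====
def Claim_equal_floor_of_target : Prop := ∀ (arr : List Int) (target : Int), Dom_floor_of_target arr target → Spec_floor_of_target arr target (floor_of_target arr target)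

-- ===== LEMMAS AND PROOFS =====
lemma loop_eq_goAlt (arr : List Int) (target : Int) :
    ∀ (size : Nat) (fuel : Nat) (lo : Nat) (best : Int), size ≤ fuel → lo + size ≤ arr.length →
      floorLoopA arr target fuel (lo : Int) ((lo : Int) + (size : Int) - 1) best
        = goAlt arr target size lo best := by
  intro size
  induction size using Nat.strong_induction_on with
  | _ size ih =>
    intro fuel lo best hfuel hlen
    match size, fuel with
    | 0, 0 => simp [floorLoopA, goAlt]
    | 0, fuel + 1 =>
      rw [floorLoopA]
      simp [goAlt]
    | size + 1, fuel + 1 =>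
      rw [floorLoopA, goAlt]
      have hk : size / 2 ≤ size := Nat.div_le_self _ _
      have hle : (lo : Int) ≤ (lo : Int) + ((size : Int) + 1) - 1 := by omega
      simp only [Nat.cast_add, Nat.cast_one, hle, if_true]
      have hmid : (lo : Int) + PySem.Int.floordiv ((lo : Int) + ((size : Int) + 1) - 1 - (lo : Int)) 2
          = ((lo + size / 2 : Nat) : Int) := by
        have : (lo : Int) + ((size : Int) + 1) - 1 - (lo : Int) = ((size : Nat) : Int) := by omega
        rw [this, show PySem.Int.floordiv (size : Int) 2 = ((size / 2 : Nat) : Int) from by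
          exact_mod_cast PySem.Int.floordiv_natCast size 2]
        push_cast; ring
      rw [hmid]
      have hv : (PySem.List.pyGet? arr ((lo + size / 2 : Nat) : Int)).getD 0
          = arr.getD (lo + size / 2) 0 := by
        rw [PySem.List.pyGet?_natCast]
        simp [List.getD]
      rw [hv]
      by_cases hvt : arr.getD (lo + size / 2) 0 ≤ target
      · simp only [hvt, if_true]
        have h1 : ((lo + size / 2 : Nat) : Int) + 1 = ((lo + size / 2 + 1 : Nat) : Int) := by
          push_cast; ring
        have h2 : (lo : Int) + ((size : Int) + 1) - 1
            = ((lo + size / 2 + 1 : Nat) : Int) + ((size - size / 2 : Nat) : Int) - 1 := by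
          push_cast [Nat.sub_add_cancel]; omega
        rw [h1, h2]
        exact ih (size - size / 2) (by omega) fuel (lo + size / 2 + 1) _ (by omega) (by omega)
      · simp only [hvt, if_false]
        have h2 : ((lo + size / 2 : Nat) : Int) - 1 = (lo : Int) + ((size / 2 : Nat) : Int) - 1 := by
          push_cast; ring
        rw [h2]
        exact ih (size / 2) (by omega) fuel lo best (by omega) (by omega)

-- ===== VERDICT =====
theorem floor_of_target_spec : Claim_equal_floor_of_target := by
  intro arr target _
  unfold Spec_floor_of_target floor_of_target floor_of_target_alt
  have := loop_eq_goAlt arr target arr.length arr.length 0 (-1) le_rfl (by omega)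
  simpa using this
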